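-- pv_equiv track=rewrite | github.com/biolab/orange3 | Orange/widgets/visualize/owvenndiagram.py | disjoint
-- ===== SOURCE A (Python) =====
-- from functools import reduce
--
-- def disjoint(sets):
--     """
--     Return all disjoint subsets.
--     """
--     sets = list(sets)
--     n = len(sets)
--     disjoint_sets = [None] * (2 ** n)
--     for i in range(2 ** n):
--         key = setkey(i, n)
--         included = [s for s, inc in zip(sets, key) if inc]
--         excluded = [s for s, inc in zip(sets, key) if not inc]
--         if any(included):
--             s = reduce(set.intersection, included)
--         else:
--             s = set()
--
--         s = reduce(set.difference, excluded, s)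
--
--         disjoint_sets[i] = s
--
--     return disjoint_sets
--
-- def setkey(intval, n):
--     return tuple(bool(intval & (2 ** i)) for i in range(n))
-- ===== SOURCE B (Python) =====
-- def disjoint(sets):
--     """
--     Return all disjoint subsets.
--     """
--     sets = list(sets)
--     n = len(sets)
--     masks = {}
--     for k, s in enumerate(sets):
--         for x in s:
--             masks[x] = masks.get(x, 0) | (1 << k)
--     buckets = [set() for _ in range(2 ** n)]
--     for x, m in masks.items():
--         buckets[m].add(x)
--     return buckets
-- ===== Notes on version B (the rewrite author's own statement) =====
-- stated objective: faster
-- what changed: Instead of computing, for each of the 2^n membership patterns, a chain of set intersections and differences over all n sets, B makes one pass over the elements to build a dict element -> membership bitmask and then buckets each element into the output set at its mask index.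
import Mathlib
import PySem

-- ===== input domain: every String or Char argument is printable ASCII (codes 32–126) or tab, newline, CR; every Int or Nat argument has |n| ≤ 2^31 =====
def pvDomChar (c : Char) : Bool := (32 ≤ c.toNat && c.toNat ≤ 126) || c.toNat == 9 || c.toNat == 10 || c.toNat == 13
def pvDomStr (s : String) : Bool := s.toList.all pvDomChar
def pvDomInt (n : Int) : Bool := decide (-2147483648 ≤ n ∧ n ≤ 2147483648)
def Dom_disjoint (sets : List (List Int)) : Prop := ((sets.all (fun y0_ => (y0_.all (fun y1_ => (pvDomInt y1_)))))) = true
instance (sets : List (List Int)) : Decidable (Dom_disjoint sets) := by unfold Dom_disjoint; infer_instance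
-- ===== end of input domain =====

-- B replaces A's per-pattern set algebra (2^n intersection/difference chains) by one pass that
-- computes each element's membership bitmask and buckets it at that index; asymptotically faster.

-- ===== PORT A =====
def setkey (intval : Int) (n : Int) : List Bool :=
  (PySem.List.pyRange 0 n 1).map (fun j => PySem.Int.band intval ((2:Int) ^ j.toNat) != 0)

def disjointBody (sets : List (List Int)) (i : Int) : List Int :=
  let n := sets.length
  let key := setkey i (n : Int)
  let included : List (List Int) := ((sets.zip key).filter (fun p => p.2)).map (fun p => p.1)
  let excluded : List (List Int) := ((sets.zip key).filter (fun p => !p.2)).map (fun p => p.1)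
  let s : PySem.Set Int :=
    if included.any (fun t => !t.isEmpty) then
      match included with
      | [] => PySem.Set.empty
      | h :: t => t.foldl PySem.Set.inter h
    else PySem.Set.empty
  excluded.foldl PySem.Set.diff s

def disjoint (sets : List (List Int)) : List (List Int) :=
  let n := sets.length
  (PySem.List.pyRange 0 ((2 ^ n : Nat) : Int) 1).map (fun i => disjointBody sets i)

-- ===== PORT B =====
def buildMasks (sets : List (List Int)) : PySem.Dict Int Int :=
  (PySem.List.enumerate sets).foldl
    (fun d p => p.2.foldl (fun d x => d.insert x (PySem.Int.bor (d.getD x 0) ((1:Int) <<< p.1.toNat))) d)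
    PySem.Dict.empty

def disjoint_alt (sets : List (List Int)) : List (List Int) :=
  let n := sets.length
  let masks := buildMasks sets
  let buckets : List (List Int) := (PySem.List.pyRange 0 ((2 ^ n : Nat) : Int) 1).map (fun _ => PySem.Set.empty)
  masks.items.foldl
    (fun bs q => bs.set q.2.toNat (PySem.Set.add (bs.getD q.2.toNat PySem.Set.empty) q.1)) buckets

-- ===== PRECONDITION & SPEC =====
-- The Python parameter is a list of SETS of ints; Pre_ admits exactly the canonical encodings of
-- such values (duplicate-free inner lists) — a list with a duplicated element encodes no Python set.
def Pre_disjoint (sets : List (List Int)) : Prop := ∀ s ∈ sets, s.Nodup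
instance (sets : List (List Int)) : Decidable (Pre_disjoint sets) := by unfold Pre_disjoint; infer_instance
def pvWitness_disjoint : List (List Int) := [[1, 2], [2, 3]]

def Spec_disjoint (sets : List (List Int)) (out : List (List Int)) : Prop := out = disjoint_alt sets
instance (sets : List (List Int)) (out : List (List Int)) : Decidable (Spec_disjoint sets out) := by unfold Spec_disjoint; infer_instance

-- ===== CLAIM =====
def Claim_equal_disjoint : Prop := ∀ (sets : List (List Int)), Dom_disjoint sets → Pre_disjoint sets → Spec_disjoint sets (disjoint sets)

-- ===== LEMMAS AND PROOFS =====

def maskOf : List (List Int) → Int → Nat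
  | [], _ => 0
  | s :: rest, x => (if x ∈ s then 1 else 0) + 2 * maskOf rest x

def lowBit (m : Nat) : Nat :=
  if _h : m % 2 = 1 ∨ m = 0 then 0 else lowBit (m / 2) + 1
decreasing_by omega

theorem lor_two_pow_of_lt : ∀ (k a : Nat), a < 2^k → a ||| 2^k = a + 2^k := by
  intro k
  induction k with
  | zero => intro a h; interval_cases a; decide
  | succ k ih =>
    intro a h
    have hm : a / 2 < 2^k := by omega
    have h1 := Nat.lor_bit (a.testBit 0) (a/2) false (2^k)
    have ht : a.testBit 0 = decide (a % 2 = 1) := by simp [Nat.testBit_zero]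
    have hb : Nat.bit (a.testBit 0) (a/2) = a := by
      rw [ht]; simp only [Nat.bit]
      by_cases hp : a % 2 = 1 <;> simp [hp] <;> omega
    have h2 : Nat.bit false (2^k) = 2^(k+1) := by simp only [Nat.bit]; simp; ring
    rw [hb, h2] at h1
    rw [h1, ht]; simp only [Bool.or_false, Nat.bit]
    rw [ih _ hm]
    by_cases hp : a % 2 = 1 <;> simp [hp] <;> omega

theorem maskOf_append (pre : List (List Int)) (s : List Int) (x : Int) :
    maskOf (pre ++ [s]) x = maskOf pre x + (if x ∈ s then 2 ^ pre.length else 0) := by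
  induction pre with
  | nil => simp [maskOf]
  | cons t rest ih =>
    simp only [List.cons_append, maskOf, ih, List.length_cons, pow_succ]
    split <;> split <;> ring

theorem maskOf_lt (sets : List (List Int)) (x : Int) : maskOf sets x < 2 ^ sets.length := by
  induction sets with
  | nil => simp [maskOf]
  | cons s rest ih =>
    simp only [maskOf, List.length_cons, pow_succ]
    split <;> omega

theorem testBit_maskOf (sets : List (List Int)) (x : Int) : ∀ (k : Nat),
    (maskOf sets x).testBit k = true ↔ (k < sets.length ∧ x ∈ sets.getD k []) := by
  induction sets with
  | nil => intro k; simp [maskOf]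
  | cons s rest ih =>
    intro k
    cases k with
    | zero =>
      simp only [maskOf, Nat.testBit_zero, List.getD_cons_zero, List.length_cons]
      constructor
      · intro h; simp at h; split at h <;> simp_all
      · intro h; simp; split <;> simp_all
    | succ k =>
      have hd : ((if x ∈ s then 1 else 0) + 2 * maskOf rest x) / 2 = maskOf rest x := by
        split <;> omega
      simp only [maskOf, Nat.testBit_add_one, hd, ih k, List.getD_cons_succ, List.length_cons]
      constructor <;> rintro ⟨h1, h2⟩ <;> exact ⟨by omega, h2⟩

theorem maskOf_eq_iff (sets : List (List Int)) (x : Int) (m : Nat) (hm : m < 2 ^ sets.length) :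
    maskOf sets x = m ↔ ∀ k < sets.length, (m.testBit k = true ↔ x ∈ sets.getD k []) := by
  constructor
  · rintro rfl
    intro k hk
    rw [testBit_maskOf]
    simp [hk]
  · intro h
    apply Nat.eq_of_testBit_eq
    intro k
    by_cases hk : k < sets.length
    · have := h k hk
      rw [Bool.eq_iff_iff, testBit_maskOf]
      constructor
      · rintro ⟨_, h2⟩; exact (this.mpr h2)
      · intro hb; exact ⟨hk, this.mp hb⟩
    · have h1 : (maskOf sets x).testBit k = false := by
        apply Nat.testBit_eq_false_of_lt
        calc maskOf sets x < 2 ^ sets.length := maskOf_lt sets x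
        _ ≤ 2 ^ k := Nat.pow_le_pow_right (by omega) (by omega)
      have h2 : m.testBit k = false := by
        apply Nat.testBit_eq_false_of_lt
        calc m < 2 ^ sets.length := hm
        _ ≤ 2 ^ k := Nat.pow_le_pow_right (by omega) (by omega)
      rw [h1, h2]

theorem maskOf_pos (sets : List (List Int)) (x : Int) (hx : x ∈ sets.flatten) :
    maskOf sets x ≠ 0 := by
  induction sets with
  | nil => simp at hx
  | cons s rest ih =>
    simp only [List.flatten_cons, List.mem_append] at hx
    simp only [maskOf]
    rcases hx with h | h
    · simp [h]
    · have := ih h; omega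

theorem lowBit_spec (m : Nat) (hm : m ≠ 0) :
    m.testBit (lowBit m) = true ∧ ∀ k < lowBit m, m.testBit k = false := by
  induction m using Nat.strong_induction_on with
  | _ m ih =>
    rw [lowBit]
    split
    · rename_i h
      have hodd : m % 2 = 1 := by omega
      constructor
      · simp [Nat.testBit_zero, hodd]
      · intro k hk; omega
    · rename_i h
      rw [not_or] at h
      have h2 : m / 2 ≠ 0 := by omega
      have := ih (m / 2) (by omega) h2
      constructor
      · rw [Nat.testBit_add_one]; exact this.1
      · intro k hk
        cases k with
        | zero => simp [Nat.testBit_zero]; omega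
        | succ k => rw [Nat.testBit_add_one]; exact this.2 k (by omega)

theorem setkey_eq (m : Nat) (n : Nat) :
    setkey (m : Int) (n : Int) = (List.range n).map (fun k => m.testBit k) := by
  unfold setkey
  rw [PySem.List.pyRange_zero_nat]
  rw [List.map_map]
  apply List.map_congr_left
  intro k _
  simp only [Function.comp]
  have h1 : ((k : Int)).toNat = k := rfl
  rw [h1]
  have h2 : (2:Int) ^ k = ((2 ^ k : Nat) : Int) := by push_cast; ring
  rw [h2, PySem.Int.band_natCast]
  rw [Nat.and_two_pow]
  cases m.testBit k <;> simp

theorem mem_sel (sets : List (List Int)) (key : List Bool) (f : Bool → Bool) (u : List Int)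
    (hlen : key.length = sets.length) :
    u ∈ ((sets.zip key).filter (fun p => f p.2)).map (fun p => p.1) ↔
      ∃ k, ∃ _hk : k < sets.length, sets.getD k [] = u ∧ f (key.getD k false) = true := by
  simp only [List.mem_map, List.mem_filter]
  constructor
  · rintro ⟨p, ⟨hpz, hpf⟩, rfl⟩
    rw [List.mem_iff_getElem] at hpz
    obtain ⟨k, hk, hp⟩ := hpz
    rw [List.getElem_zip] at hp
    have hk' : k < sets.length := by simp [List.length_zip, hlen] at hk; omega
    refine ⟨k, hk', ?_, ?_⟩
    · rw [List.getD_eq_getElem _ _ hk', ← hp]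
    · rw [List.getD_eq_getElem _ _ (by omega)]; rw [← hp] at hpf; exact hpf
  · rintro ⟨k, hk, hu, hf⟩
    refine ⟨(sets[k], key[k]'(by omega)), ⟨?_, ?_⟩, ?_⟩
    · rw [List.mem_iff_getElem]
      exact ⟨k, by simp [List.length_zip, hlen]; omega, by rw [List.getElem_zip]⟩
    · rw [List.getD_eq_getElem _ _ (by omega)] at hf; exact hf
    · rw [List.getD_eq_getElem _ _ hk] at hu; exact hu

theorem mem_incl (sets : List (List Int)) (m : Nat) (u : List Int) :
    u ∈ ((sets.zip ((List.range sets.length).map (fun k => m.testBit k))).filter (fun p => p.2)).map (fun p => p.1) ↔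
      ∃ k, ∃ _hk : k < sets.length, sets.getD k [] = u ∧ m.testBit k = true := by
  have h := mem_sel sets ((List.range sets.length).map (fun k => m.testBit k)) (fun b => b) u (by simp)
  simp only at h
  rw [h]
  constructor <;> rintro ⟨k, hk, hu, hb⟩ <;>
    exact ⟨k, hk, hu, by
      rw [List.getD_eq_getElem _ _ (by simpa using hk)] at * <;> simp_all⟩

theorem mem_excl (sets : List (List Int)) (m : Nat) (u : List Int) :
    u ∈ ((sets.zip ((List.range sets.length).map (fun k => m.testBit k))).filter (fun p => !p.2)).map (fun p => p.1) ↔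
      ∃ k, ∃ _hk : k < sets.length, sets.getD k [] = u ∧ m.testBit k = false := by
  have h := mem_sel sets ((List.range sets.length).map (fun k => m.testBit k)) (fun b => !b) u (by simp)
  simp only at h
  rw [h]
  constructor <;> rintro ⟨k, hk, hu, hb⟩ <;>
    exact ⟨k, hk, hu, by
      rw [List.getD_eq_getElem _ _ (by simpa using hk)] at * <;> simp_all⟩

theorem foldl_inter (t : List (List Int)) : ∀ (h : List Int),
    t.foldl PySem.Set.inter h = h.filter (fun x => t.all (fun u => u.contains x)) := by
  induction t with
  | nil => intro h; simp
  | cons u t ih =>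
    intro h
    simp only [List.foldl_cons, ih, PySem.Set.inter, List.filter_filter]
    apply List.filter_congr
    intro x _
    simp [Bool.and_comm]

theorem foldl_diff (t : List (List Int)) : ∀ (s : List Int),
    t.foldl PySem.Set.diff s = s.filter (fun x => t.all (fun u => !u.contains x)) := by
  induction t with
  | nil => intro s; simp
  | cons u t ih =>
    intro s
    simp only [List.foldl_cons, ih, PySem.Set.diff, List.filter_filter]
    apply List.filter_congr
    intro x _
    simp [Bool.and_comm]

theorem head_filter_sel (j : Nat) : ∀ (l : List (List Int)) (key : List Bool),
    j < l.length → j < key.length →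
    (∀ k < j, key.getD k true = false) → key.getD j false = true →
    ∃ t, ((l.zip key).filter (fun p => p.2)).map (fun p => p.1) = l.getD j [] :: t := by
  induction j with
  | zero =>
    intro l key hl hk _ hj
    cases l with | nil => simp at hl | cons a l =>
    cases key with | nil => simp at hk | cons b key =>
    simp at hj
    subst hj
    simp [List.zip_cons_cons]
  | succ j ih =>
    intro l key hl hk hlow hj
    cases l with | nil => simp at hl | cons a l =>
    cases key with | nil => simp at hk | cons b key =>
    have hb : b = false := by have := hlow 0 (by omega); simpa using this
    subst hb
    simp only [List.zip_cons_cons, List.filter_cons]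
    simp only [List.getD_cons_succ]
    exact ih l key (by simpa using hl) (by simpa using hk)
      (fun k hk2 => by have := hlow (k+1) (by omega); simpa using this) (by simpa using hj)

theorem disjointBody_eq (sets : List (List Int)) (i : Int) :
    disjointBody sets i =
      List.foldl PySem.Set.diff
        (if ((((sets.zip (setkey i (sets.length : Int))).filter (fun p => p.2)).map (fun p => p.1)).any (fun t => !t.isEmpty)) = true then
           match ((sets.zip (setkey i (sets.length : Int))).filter (fun p => p.2)).map (fun p => p.1) with
           | [] => PySem.Set.empty
           | h :: t => List.foldl PySem.Set.inter h t
         else PySem.Set.empty)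
        (((sets.zip (setkey i (sets.length : Int))).filter (fun p => !p.2)).map (fun p => p.1)) := rfl

theorem body_char (sets : List (List Int)) (m : Nat) (hlt : m < 2 ^ sets.length) (hm : m ≠ 0) :
    disjointBody sets (m : Int) =
      (sets.getD (lowBit m) []).filter (fun x => maskOf sets x == m) := by
  have hbit := lowBit_spec m hm
  have hj0 : lowBit m < sets.length := by
    by_contra hc
    have : m.testBit (lowBit m) = false := by
      apply Nat.testBit_eq_false_of_lt
      calc m < 2 ^ sets.length := hlt
      _ ≤ 2 ^ lowBit m := Nat.pow_le_pow_right (by omega) (by omega)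
    rw [this] at hbit; simp at hbit
  rw [disjointBody_eq]
  rw [setkey_eq m sets.length]
  set key := (List.range sets.length).map (fun k => m.testBit k) with hkeydef
  have hkgetD : ∀ k, k < sets.length → ∀ d, key.getD k d = m.testBit k := by
    intro k hk d
    rw [hkeydef, List.getD_eq_getElem _ _ (by simpa using hk)]
    simp
  obtain ⟨t, ht⟩ := head_filter_sel (lowBit m) sets key hj0 (by simp [hkeydef]; omega)
    (fun k hk => by rw [hkgetD k (by omega)]; exact hbit.2 k hk)
    (by rw [hkgetD _ hj0]; exact hbit.1)
  simp only [ht]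
  -- membership characterizations
  have hmemI := mem_incl sets m
  have hmemE := mem_excl sets m
  rw [← hkeydef] at hmemI hmemE
  set excluded := ((sets.zip key).filter (fun p => !p.2)).map (fun p => p.1) with hexcl
  set h0 := sets.getD (lowBit m) [] with hh0
  -- the common predicate step
  have hpred : ∀ x ∈ h0,
      (excluded.all (fun u => !u.contains x) && t.all (fun u => u.contains x)) = (maskOf sets x == m) := by
    intro x hx
    rw [Bool.eq_iff_iff]
    simp only [Bool.and_eq_true, List.all_eq_true, beq_iff_eq, List.contains_eq_mem,
      Bool.not_eq_eq_eq_not, Bool.not_true, decide_eq_true_eq, decide_eq_false_iff_not]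
    rw [maskOf_eq_iff sets x m hlt]
    constructor
    · rintro ⟨hexc, hall⟩ k hk
      by_cases hb : m.testBit k = true
      · have hmem : sets.getD k [] ∈ h0 :: t := by
          rw [← ht]; exact (hmemI _).mpr ⟨k, hk, rfl, hb⟩
        rcases List.mem_cons.mp hmem with heq | hmem'
        · exact ⟨fun _ => by rw [heq]; exact hx, fun _ => hb⟩
        · exact ⟨fun _ => hall _ hmem', fun _ => hb⟩
      · have hb' : m.testBit k = false := by simpa using hb
        have hmem : sets.getD k [] ∈ excluded := (hmemE _).mpr ⟨k, hk, rfl, hb'⟩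
        have hxn := hexc _ hmem
        constructor
        · intro hcontr; rw [hb'] at hcontr; cases hcontr
        · intro hxm; exact absurd hxm hxn
    · intro hchar
      refine ⟨?_, ?_⟩
      swap
      · intro u hu
        have hmem : u ∈ h0 :: t := List.mem_cons_of_mem _ hu
        rw [← ht] at hmem
        obtain ⟨k, hk, hu2, hb⟩ := (hmemI _).mp hmem
        rw [← hu2]
        exact (hchar k hk).mp hb
      · intro u hu
        obtain ⟨k, hk, hu2, hb⟩ := (hmemE _).mp hu
        rw [← hu2]
        intro hxm
        have := (hchar k hk).mpr hxm
        rw [this] at hb; simp at hb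
  by_cases hg : (h0 :: t).any (fun u => !u.isEmpty) = true
  · rw [if_pos hg]
    simp only [foldl_inter, foldl_diff, List.filter_filter]
    exact List.filter_congr hpred
  · rw [if_neg hg]
    have hh0e : h0 = [] := by
      rcases hh : h0 with _ | ⟨a, h0'⟩
      · rfl
      · exfalso; apply hg; simp [hh]
    rw [foldl_diff]
    show List.filter _ [] = _
    rw [hh0e]
    simp

theorem shl_one (k : Nat) : (1 : Int) <<< k = ((2 ^ k : Nat) : Int) := by
  rw [Int.shiftLeft_eq]; push_cast; ring

theorem getD_inner (c : Int) (s : List Int) (hs : s.Nodup) :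
    ∀ (d : PySem.Dict Int Int) (y : Int),
    (s.foldl (fun d x => d.insert x (PySem.Int.bor (d.getD x 0) c)) d).getD y 0 =
      if y ∈ s then PySem.Int.bor (d.getD y 0) c else d.getD y 0 := by
  induction s with
  | nil => intro d y; simp
  | cons x s ih =>
    intro d y
    have hs' : s.Nodup := hs.of_cons
    rw [List.foldl_cons, ih hs']
    by_cases hy : y ∈ s
    · have hne : y ≠ x := by rintro rfl; exact (List.nodup_cons.mp hs).1 hy
      rw [if_pos hy, if_pos (List.mem_cons_of_mem _ hy)]
      rw [PySem.Dict.getD_insert_of_ne _ _ _ hne]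
    · rw [if_neg hy]
      by_cases hyx : y = x
      · subst hyx
        rw [if_pos (List.mem_cons_self), PySem.Dict.getD_insert_self]
      · rw [if_neg (by simp [hyx, hy]), PySem.Dict.getD_insert_of_ne _ _ _ hyx]

theorem buildMasks_append (pre : List (List Int)) (s : List Int) :
    buildMasks (pre ++ [s]) =
      s.foldl (fun d x => d.insert x (PySem.Int.bor (d.getD x 0) ((1:Int) <<< pre.length)))
        (buildMasks pre) := by
  unfold buildMasks
  rw [PySem.List.enumerate_append, List.foldl_append]
  simp [PySem.List.enumerate_cons, PySem.List.enumerate_nil]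

theorem getD_buildMasks (sets : List (List Int)) (hnd : Pre_disjoint sets) (x : Int) :
    (buildMasks sets).getD x 0 = ((maskOf sets x : Nat) : Int) := by
  induction sets using List.reverseRecOn with
  | nil => simp [buildMasks, PySem.List.enumerate_nil, maskOf]
  | append_singleton pre s ih =>
    have hpre : Pre_disjoint pre := fun t ht => hnd t (List.mem_append_left _ ht)
    have hsnd : s.Nodup := hnd s (List.mem_append_right _ (List.mem_singleton_self s))
    rw [buildMasks_append, getD_inner _ _ hsnd, ih hpre, shl_one, PySem.Int.bor_natCast,
      lor_two_pow_of_lt _ _ (maskOf_lt pre x), maskOf_append]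
    split <;> simp

theorem keys_buildMasks (sets : List (List Int)) :
    (buildMasks sets).keys = PySem.List.dedup sets.flatten := by
  induction sets using List.reverseRecOn with
  | nil => simp [buildMasks, PySem.List.enumerate_nil, PySem.List.dedup]
  | append_singleton pre s ih =>
    rw [buildMasks_append, PySem.Dict.keys_foldl_insert, ih]
    rw [PySem.List.dedup_eq_ofList, PySem.List.dedup_eq_ofList, List.flatten_append,
      List.flatten_cons, List.flatten_nil, List.append_nil, PySem.Set.ofList_append]

theorem nodup_keys_buildMasks (sets : List (List Int)) : (buildMasks sets).keys.Nodup := by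
  rw [keys_buildMasks, PySem.List.dedup_eq_ofList]
  exact PySem.Set.nodup_ofList _

theorem items_buildMasks (sets : List (List Int)) (hnd : Pre_disjoint sets) :
    (buildMasks sets).items =
      (PySem.List.dedup sets.flatten).map (fun x => (x, ((maskOf sets x : Nat) : Int))) := by
  rw [PySem.Dict.items_eq_map_keys _ (nodup_keys_buildMasks sets) 0, keys_buildMasks]
  apply List.map_congr_left
  intro x _
  rw [getD_buildMasks sets hnd x]

theorem fill_length (D : List (Int × Int)) : ∀ (bs : List (List Int)),
    (D.foldl (fun bs q => bs.set q.2.toNat (PySem.Set.add (bs.getD q.2.toNat PySem.Set.empty) q.1)) bs).length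
      = bs.length := by
  induction D with
  | nil => intro bs; rfl
  | cons p D ih => intro bs; rw [List.foldl_cons, ih, List.length_set]

theorem fill_getD (D : List (Int × Int)) : ∀ (bs : List (List Int)),
    (D.map (fun p => p.1)).Nodup →
    (∀ p ∈ D, 0 ≤ p.2 ∧ p.2.toNat < bs.length) →
    (∀ p ∈ D, ∀ b ∈ bs, p.1 ∉ b) →
    ∀ i, i < bs.length →
    (D.foldl (fun bs q => bs.set q.2.toNat (PySem.Set.add (bs.getD q.2.toNat PySem.Set.empty) q.1)) bs).getD i []
      = bs.getD i [] ++ (D.filter (fun p => p.2.toNat == i)).map (fun p => p.1) := by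
  induction D with
  | nil => intro bs _ _ _ i hi; simp
  | cons p D ih =>
    intro bs hnd hrange hnotin i hi
    have hplt : p.2.toNat < bs.length := (hrange p (List.mem_cons_self)).2
    have hbucket : bs.getD p.2.toNat [] ∈ bs := by
      rw [List.getD_eq_getElem _ _ hplt]; exact List.getElem_mem _
    have hpnotin : p.1 ∉ bs.getD p.2.toNat [] := hnotin p (List.mem_cons_self) _ hbucket
    have hadd : PySem.Set.add (bs.getD p.2.toNat PySem.Set.empty) p.1
        = bs.getD p.2.toNat [] ++ [p.1] := PySem.Set.add_of_not_mem hpnotin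
    rw [List.foldl_cons, hadd]
    set bs' := bs.set p.2.toNat (bs.getD p.2.toNat [] ++ [p.1]) with hbs'
    have hlen' : bs'.length = bs.length := by rw [hbs', List.length_set]
    have hD1 : (D.map (fun p => p.1)).Nodup := (List.nodup_cons.mp hnd).2
    have hpD : p.1 ∉ D.map (fun p => p.1) := (List.nodup_cons.mp hnd).1
    rw [ih bs' hD1
      (fun q hq => ⟨(hrange q (List.mem_cons_of_mem _ hq)).1, by
        rw [hlen']; exact (hrange q (List.mem_cons_of_mem _ hq)).2⟩)
      (fun q hq b hb => by
        rcases List.mem_or_eq_of_mem_set hb with hb' | rfl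
        · exact hnotin q (List.mem_cons_of_mem _ hq) b hb'
        · intro hmem
          rcases List.mem_append.mp hmem with h1 | h1
          · exact hnotin q (List.mem_cons_of_mem _ hq) _ hbucket h1
          · have heq : q.1 = p.1 := List.mem_singleton.mp h1
            exact hpD (heq ▸ List.mem_map.mpr ⟨q, hq, rfl⟩))
      i (by omega)]
    rw [List.filter_cons]
    by_cases hpi : p.2.toNat = i
    · subst hpi
      rw [if_pos (by simp)]
      have : bs'.getD p.2.toNat [] = bs.getD p.2.toNat [] ++ [p.1] := by
        rw [hbs', List.getD_eq_getElem _ _ (by rw [List.length_set]; exact hplt),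
          List.getElem_set_self]
      rw [this, List.map_cons, List.append_assoc]
      simp
    · rw [if_neg (by simpa using hpi)]
      have : bs'.getD i [] = bs.getD i [] := by
        rw [hbs', List.getD_eq_getElem _ _ (by rw [List.length_set]; omega),
          List.getElem_set_ne (by omega)]
        exact (List.getD_eq_getElem _ _ hi).symm
      rw [this]

theorem disjoint_alt_eq (sets : List (List Int)) :
    disjoint_alt sets =
      (buildMasks sets).items.foldl
        (fun bs q => bs.set q.2.toNat (PySem.Set.add (bs.getD q.2.toNat PySem.Set.empty) q.1))
        ((PySem.List.pyRange 0 ((2 ^ sets.length : Nat) : Int) 1).map (fun _ => PySem.Set.empty)) := rfl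

theorem buckets_len (n : Nat) :
    ((PySem.List.pyRange 0 ((2 ^ n : Nat) : Int) 1).map (fun _ => (PySem.Set.empty : List Int))).length = 2 ^ n := by
  rw [List.length_map, PySem.List.length_pyRange_one, Int.sub_zero, Int.toNat_natCast]

theorem alt_length (sets : List (List Int)) : (disjoint_alt sets).length = 2 ^ sets.length := by
  rw [disjoint_alt_eq, fill_length, buckets_len]

theorem a_length (sets : List (List Int)) : (disjoint sets).length = 2 ^ sets.length := by
  unfold disjoint
  rw [List.length_map, PySem.List.length_pyRange_one, Int.sub_zero, Int.toNat_natCast]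

theorem body_zero (sets : List (List Int)) : disjointBody sets 0 = [] := by
  rw [disjointBody_eq]
  have h0 : (0 : Int) = ((0 : Nat) : Int) := rfl
  rw [h0, setkey_eq 0 sets.length]
  have hincl : ((sets.zip ((List.range sets.length).map (fun k => Nat.testBit 0 k))).filter (fun p => p.2)).map (fun p => (p.1 : List Int)) = [] := by
    rw [List.map_eq_nil_iff, List.filter_eq_nil_iff]
    intro p hp
    have h2 := (List.of_mem_zip hp).2
    rw [List.mem_map] at h2
    obtain ⟨k, _, hk⟩ := h2
    rw [← hk]
    simp [Nat.zero_testBit]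
  rw [hincl]
  rw [if_neg (by simp)]
  rw [foldl_diff]
  rfl

theorem alt_char (sets : List (List Int)) (hnd : Pre_disjoint sets) (i : Nat) (hi : i < 2 ^ sets.length) :
    (disjoint_alt sets).getD i [] =
      (PySem.List.dedup sets.flatten).filter (fun x => maskOf sets x == i) := by
  rw [disjoint_alt_eq, items_buildMasks sets hnd]
  set L := PySem.List.dedup sets.flatten with hL
  have hLnodup : L.Nodup := by
    rw [hL, PySem.List.dedup_eq_ofList]; exact PySem.Set.nodup_ofList _
  have hLflat : ∀ x ∈ L, x ∈ sets.flatten := by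
    intro x hx; rw [hL, PySem.List.dedup_eq_ofList, PySem.Set.mem_ofList] at hx; exact hx
  rw [fill_getD _ _
    (by
      rw [List.map_map]
      have hcomp : ((fun p : Int × Int => p.1) ∘ (fun x : Int => (x, ((maskOf sets x : Nat) : Int)))) = fun x : Int => x := rfl
      rw [hcomp]
      simpa using hLnodup)
    (by
      intro p hp
      rw [List.mem_map] at hp
      obtain ⟨x, _, rfl⟩ := hp
      constructor
      · positivity
      · rw [buckets_len, Int.toNat_natCast]; exact maskOf_lt sets x)
    (by
      intro p hp b hb
      rw [List.mem_map] at hb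
      obtain ⟨_, _, rfl⟩ := hb
      simp [PySem.Set.empty])
    i (by rw [buckets_len]; exact hi)]
  have hbempty : ((PySem.List.pyRange 0 ((2 ^ sets.length : Nat) : Int) 1).map (fun _ => (PySem.Set.empty : List Int))).getD i [] = [] := by
    rw [List.getD_eq_getElem _ _ (by rw [buckets_len]; exact hi), List.getElem_map]
    rfl
  rw [hbempty, List.nil_append]
  rw [List.filter_map, List.map_map]
  have : ((fun p => p.1) ∘ fun x => (x, ((maskOf sets x : Nat) : Int))) = fun x : Int => x := rfl
  rw [this, List.map_id']
  apply List.filter_congr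
  intro x _
  simp only [Function.comp]
  rw [Int.toNat_natCast]

theorem order_lemma (sets : List (List Int)) (hnd : Pre_disjoint sets) (m : Nat)
    (hm : m ≠ 0) (hlt : m < 2 ^ sets.length) :
    (PySem.List.dedup sets.flatten).filter (fun x => maskOf sets x == m) =
      (sets.getD (lowBit m) []).filter (fun x => maskOf sets x == m) := by
  have hbit := lowBit_spec m hm
  have hj0 : lowBit m < sets.length := by
    by_contra hc
    have : m.testBit (lowBit m) = false := by
      apply Nat.testBit_eq_false_of_lt
      calc m < 2 ^ sets.length := hlt
      _ ≤ 2 ^ lowBit m := Nat.pow_le_pow_right (by omega) (by omega)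
    rw [this] at hbit; simp at hbit
  set j0 := lowBit m with hj0def
  set s := sets.getD j0 [] with hsdef
  have hsnd : s.Nodup := by
    rw [hsdef, List.getD_eq_getElem _ _ hj0]
    exact hnd _ (List.getElem_mem _)
  -- p-elements are in s, and not in earlier sets
  have hin_s : ∀ x : Int, maskOf sets x = m → x ∈ s := by
    intro x hx
    have := (testBit_maskOf sets x j0).mp (by rw [hx]; exact hbit.1)
    exact this.2
  have hnot_early : ∀ x : Int, maskOf sets x = m → ∀ u ∈ sets.take j0, x ∉ u := by
    intro x hx u hu hxu
    rw [List.mem_iff_getElem] at hu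
    obtain ⟨k, hk, hu2⟩ := hu
    have hklt : k < j0 := by simp at hk; omega
    have hkset : k < sets.length := by omega
    rw [List.getElem_take] at hu2
    have : (maskOf sets x).testBit k = true :=
      (testBit_maskOf sets x k).mpr ⟨hkset, by rw [List.getD_eq_getElem _ _ hkset, hu2]; exact hxu⟩
    rw [hx, hbit.2 k hklt] at this
    cases this
  -- decompose
  have hdecomp : sets.flatten = (sets.take j0).flatten ++ (s ++ (sets.drop (j0+1)).flatten) := by
    conv_lhs => rw [← List.take_append_drop j0 sets]
    rw [List.flatten_append]
    congr 1
    rw [hsdef, List.getD_eq_getElem _ _ hj0]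
    rw [List.drop_eq_getElem_cons hj0, List.flatten_cons]
  set A := (sets.take j0).flatten with hA
  set C := (sets.drop (j0+1)).flatten with hC
  have hnotA : ∀ x : Int, maskOf sets x = m → x ∉ PySem.Set.ofList A := by
    intro x hx hmem
    rw [PySem.Set.mem_ofList] at hmem
    rw [hA, List.mem_flatten] at hmem
    obtain ⟨u, hu, hxu⟩ := hmem
    exact hnot_early x hx u hu hxu
  rw [PySem.List.dedup_eq_ofList, hdecomp, PySem.Set.ofList_append, PySem.Set.update_append,
    PySem.Set.update_eq_append_filter, List.filter_append]
  have h2 : (List.filter (fun x => maskOf sets x == m)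
      (List.filter (fun y => !(((PySem.Set.ofList A).update s).contains y)) (PySem.Set.ofList C))) = [] := by
    rw [List.filter_eq_nil_iff]
    intro y hy
    rw [List.mem_filter] at hy
    simp only [beq_iff_eq]
    intro hmask
    have hyin : y ∈ (PySem.Set.ofList A).update s := by
      rw [PySem.Set.mem_update]
      exact Or.inr (hin_s y hmask)
    have := hy.2
    rw [Bool.not_eq_eq_eq_not, Bool.not_true] at this
    rw [← PySem.Set.contains_iff] at hyin
    rw [this] at hyin
    cases hyin
  rw [h2, List.append_nil]
  rw [PySem.Set.update_eq_append_filter, List.filter_append]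
  have h3 : (List.filter (fun x => maskOf sets x == m) (PySem.Set.ofList A)) = [] := by
    rw [List.filter_eq_nil_iff]
    intro y hy
    simp only [beq_iff_eq]
    intro hmask
    exact hnotA y hmask hy
  rw [h3, List.nil_append]
  rw [PySem.Set.ofList_eq_self_of_nodup _ hsnd, List.filter_filter]
  apply List.filter_congr
  intro x hx
  by_cases hmask : maskOf sets x = m
  · have hxA : x ∉ A := fun hmem => hnotA x hmask (by rw [PySem.Set.mem_ofList]; exact hmem)
    simp [hmask, hxA]
  · simp [hmask]

-- ===== VERDICT =====
theorem disjoint_spec : Claim_equal_disjoint := by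
  intro sets _hdom hnd
  unfold Spec_disjoint
  apply List.ext_getElem (by rw [a_length, alt_length])
  intro i h1 h2
  have hi : i < 2 ^ sets.length := by rw [a_length] at h1; exact h1
  have hA : (disjoint sets)[i] = disjointBody sets ((i : Nat) : Int) := by
    unfold disjoint
    rw [List.getElem_map, PySem.List.getElem_pyRange_one, zero_add]
  have hB : (disjoint_alt sets)[i] = (disjoint_alt sets).getD i [] :=
    (List.getD_eq_getElem _ _ h2).symm
  rw [hA, hB, alt_char sets hnd i hi]
  by_cases hz : i = 0
  · subst hz
    rw [show ((0 : Nat) : Int) = (0 : Int) from rfl, body_zero]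
    symm
    rw [List.filter_eq_nil_iff]
    intro x hx
    have hxf : x ∈ sets.flatten := by
      rw [PySem.List.dedup_eq_ofList, PySem.Set.mem_ofList] at hx
      exact hx
    simpa using maskOf_pos sets x hxf
  · rw [body_char sets i hi hz, order_lemma sets hnd i hz hi]
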